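-- pv_equiv track=rewrite | github.com/Ravinderbaid/interviewbit | Day31/sumthedifference.py | solve
-- ===== SOURCE A (Python) =====
-- def solve(A):
--     A.sort()
--     MOD = 1000000007
--     min_sum=0
--     max_sum=0
--     n=len(A)
--     for i in range(0,n):
--
--         max_sum= 2*max_sum+A[n-1-i]
--         max_sum%=MOD
--         min_sum=2*min_sum+A[i]
--         min_sum%=MOD
--
--     return (max_sum-min_sum+MOD)%MOD
-- ===== SOURCE B (Python) =====
-- def solve(A):
--     A.sort()
--     MOD = 1000000007
--     n = len(A)
--     res = 0
--     for i in range(n - 1):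
--         res = (res + (A[i + 1] - A[i]) * (pow(2, i + 1, MOD) - 1) % MOD * (pow(2, n - 1 - i, MOD) - 1)) % MOD
--     return res
-- ===== Notes on version B (the rewrite author's own statement) =====
-- stated objective: alternative
-- what changed: Replaces A's per-element max/min contributions (two interleaved Horner accumulators doubled mod p from both ends) with the gap-counting algorithm: after sorting, each adjacent gap A[i+1]-A[i] is counted once for every subset whose range spans it, i.e. weighted by (2^(i+1)-1)*(2^(n-1-i)-1) computed with modular exponentiation.
import Mathlib
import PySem

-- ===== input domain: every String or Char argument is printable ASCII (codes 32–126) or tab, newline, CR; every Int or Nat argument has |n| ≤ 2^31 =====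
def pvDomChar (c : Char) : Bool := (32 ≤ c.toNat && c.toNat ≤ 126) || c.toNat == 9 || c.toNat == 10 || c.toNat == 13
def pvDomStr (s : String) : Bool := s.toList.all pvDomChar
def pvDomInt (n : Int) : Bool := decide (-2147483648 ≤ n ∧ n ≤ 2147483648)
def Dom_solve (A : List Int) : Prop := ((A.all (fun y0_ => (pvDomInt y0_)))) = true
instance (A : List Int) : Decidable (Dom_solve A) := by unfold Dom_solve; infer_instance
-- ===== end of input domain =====

-- B replaces A's per-element Horner accumulation of max/min contributions with the
-- gap-counting algorithm: each adjacent gap of the sorted list, weighted by the number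
-- of subsets spanning it, (2^(i+1)-1)*(2^(n-1-i)-1) via modular exponentiation
-- (objective: alternative).
-- A sorts its argument in place; the equivalence proved here is about the RETURN value
-- (B performs the same in-place sort).

-- ===== PORT A =====
-- indices i and n-1-i are always in range for i in range(n), so pyGetD's default 0 is never used
def solve (A : List Int) : Int :=
  let s := PySem.List.sorted A id false
  let MOD : Int := 1000000007
  let n : Int := s.length
  let r := (PySem.List.pyRange 0 n 1).foldl
    (fun (p : Int × Int) i =>
      (PySem.Int.mod (2 * p.1 + PySem.List.pyGetD s i 0) MOD,
       PySem.Int.mod (2 * p.2 + PySem.List.pyGetD s (n - 1 - i) 0) MOD))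
    (0, 0)
  PySem.Int.mod (r.2 - r.1 + MOD) MOD

-- ===== PORT B =====
-- exponents i+1 and n-1-i are nonnegative for i in range(n-1), so .toNat is exact for pow(2, e, MOD)
def solve_alt (A : List Int) : Int :=
  let s := PySem.List.sorted A id false
  let MOD : Int := 1000000007
  let n : Int := s.length
  (PySem.List.pyRange 0 (n - 1) 1).foldl
    (fun r i =>
      PySem.Int.mod
        (r + PySem.Int.mod ((PySem.List.pyGetD s (i + 1) 0 - PySem.List.pyGetD s i 0)
                * (PySem.Int.powMod 2 (i + 1).toNat MOD - 1)) MOD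
           * (PySem.Int.powMod 2 (n - 1 - i).toNat MOD - 1))
        MOD)
    0

-- ===== PRECONDITION & SPEC =====
def Spec_solve (A : List Int) (out : Int) : Prop := out = solve_alt A
instance (A : List Int) (out : Int) : Decidable (Spec_solve A out) := by unfold Spec_solve; infer_instance

-- ===== CLAIM (what is proved, stated in full; the proofs are below) =====
def Claim_equal_solve : Prop := ∀ (A : List Int), Dom_solve A → Spec_solve A (solve A)

-- ===== LEMMAS AND PROOFS =====

-- exact (unreduced) Horner value of a list, most-significant first
def pvH (l : List Int) (acc : Int) : Int := l.foldl (fun m a => 2 * m + a) acc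

-- min-side value: V l = Σ l[j] * 2^(|l|-1-j)
def pvV : List Int → Int
  | [] => 0
  | a :: t => a * 2 ^ t.length + pvV t

-- max-side value: W l = Σ l[j] * 2^j
def pvW : List Int → Int
  | [] => 0
  | a :: t => a + 2 * pvW t

lemma pvH_acc (l : List Int) (acc : Int) : pvH l acc = acc * 2 ^ l.length + pvH l 0 := by
  induction l generalizing acc with
  | nil => simp [pvH]
  | cons a t ih =>
    show pvH t (2 * acc + a) = acc * 2 ^ (a :: t).length + pvH t (2 * 0 + a)
    rw [ih (2 * acc + a), ih (2 * 0 + a), List.length_cons, pow_succ]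
    ring

lemma pvH_eq_pvV (l : List Int) : pvH l 0 = pvV l := by
  induction l with
  | nil => rfl
  | cons a t ih =>
    show pvH t (2 * 0 + a) = pvV (a :: t)
    rw [pvH_acc t (2 * 0 + a), ih, pvV]
    ring

lemma pvH_reverse_eq_pvW (l : List Int) : pvH l.reverse 0 = pvW l := by
  induction l with
  | nil => rfl
  | cons a t ih =>
    rw [List.reverse_cons]
    simp only [pvH, List.foldl_append, List.foldl_cons, List.foldl_nil]
    rw [show t.reverse.foldl (fun m a => 2 * m + a) 0 = pvW t from ih, pvW]
    ring

-- folding A's mod-at-each-step Horner equals reducing the exact Horner value once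
lemma pvHmod (l : List Int) (x : Int) :
    l.foldl (fun m a => PySem.Int.mod (2 * m + a) 1000000007) (PySem.Int.mod x 1000000007)
      = PySem.Int.mod (pvH l x) 1000000007 := by
  induction l generalizing x with
  | nil => rfl
  | cons a t ih =>
    simp only [List.foldl_cons, pvH] at *
    have h1 : PySem.Int.mod (2 * PySem.Int.mod x 1000000007 + a) 1000000007
        = PySem.Int.mod (2 * x + a) 1000000007 := by
      rw [PySem.Int.mod_eq_emod_of_pos (by norm_num), PySem.Int.mod_eq_emod_of_pos (by norm_num),
          PySem.Int.mod_eq_emod_of_pos (by norm_num)]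
      omega
    rw [h1, ih (2 * x + a)]

lemma pvGet_rev (s : List Int) (i : Int) (h0 : 0 ≤ i) (h1 : i < (s.length : Int)) :
    PySem.List.pyGetD s ((s.length : Int) - 1 - i) 0 = PySem.List.pyGetD s.reverse i 0 := by
  rw [PySem.List.pyGetD_eq_getElem s 0 (by omega) (by omega),
      PySem.List.pyGetD_eq_getElem s.reverse 0 h0 (by simpa using h1)]
  rw [List.getElem_reverse]
  congr 1
  omega

-- B's mod-at-each-step additive fold equals reducing the exact sum once,
-- when each added term is congruent mod p to its exact counterpart
lemma pvFoldMod (l : List ℕ) (g h : ℕ → Int) (x : Int)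
    (hc : ∀ i ∈ l, g i % 1000000007 = h i % 1000000007) :
    l.foldl (fun r i => PySem.Int.mod (r + g i) 1000000007) (PySem.Int.mod x 1000000007)
      = PySem.Int.mod (x + (l.map h).sum) 1000000007 := by
  induction l generalizing x with
  | nil => simp only [List.foldl_nil, List.map_nil, List.sum_nil, add_zero]
  | cons a t ih =>
    simp only [List.foldl_cons, List.map_cons, List.sum_cons]
    have h1 : PySem.Int.mod (PySem.Int.mod x 1000000007 + g a) 1000000007
        = PySem.Int.mod (x + h a) 1000000007 := by
      have := hc a (List.mem_cons_self)
      rw [PySem.Int.mod_eq_emod_of_pos (by norm_num), PySem.Int.mod_eq_emod_of_pos (by norm_num),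
          PySem.Int.mod_eq_emod_of_pos (by norm_num)]
      omega
    rw [h1, ih (x + h a) (fun i hi => hc i (List.mem_cons_of_mem a hi)), add_assoc]

-- the same with the literal initial accumulator 0 the port uses
lemma pvFoldMod0 (l : List ℕ) (g h : ℕ → Int)
    (hc : ∀ i ∈ l, g i % 1000000007 = h i % 1000000007) :
    l.foldl (fun r i => PySem.Int.mod (r + g i) 1000000007) 0
      = PySem.Int.mod ((l.map h).sum) 1000000007 := by
  have h0 : PySem.Int.mod (0 : Int) 1000000007 = 0 := by decide
  have hgen := pvFoldMod l g h 0 hc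
  rw [h0, zero_add] at hgen
  exact hgen

-- one gap's reduced weight-product is congruent mod p to the exact product
lemma pvTermCong (d x y : Int) :
    PySem.Int.mod (d * (x % 1000000007 - 1)) 1000000007 * (y % 1000000007 - 1) % 1000000007
      = d * (x - 1) * (y - 1) % 1000000007 := by
  have hx : x % 1000000007 ≡ x [ZMOD 1000000007] := Int.emod_emod_of_dvd x dvd_rfl
  have hy : y % 1000000007 ≡ y [ZMOD 1000000007] := Int.emod_emod_of_dvd y dvd_rfl
  have h1 : PySem.Int.mod (d * (x % 1000000007 - 1)) 1000000007
      ≡ d * (x - 1) [ZMOD 1000000007] := by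
    rw [PySem.Int.mod_eq_emod_of_pos (by norm_num)]
    exact (Int.emod_emod_of_dvd _ dvd_rfl).trans ((hx.sub_right 1).mul_left d)
  exact h1.mul (hy.sub_right 1)

-- gap sum with c extra elements to the left of the list: closed form
lemma pvGapSumAux (a : Int) (t : List Int) (c : ℕ) :
    ((List.range t.length).map (fun k =>
        ((a :: t).getD (k + 1) 0 - (a :: t).getD k 0)
          * (2 ^ (c + k + 1) - 1) * (2 ^ (t.length - k) - 1))).sum
      = 2 ^ c * pvW (a :: t) - pvV (a :: t) - a * (2 ^ c - 1) * (2 ^ (t.length + 1) - 1) := by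
  induction t generalizing a c with
  | nil => simp [pvW, pvV]; ring
  | cons b t ih =>
    rw [List.length_cons, List.range_succ_eq_map, List.map_cons, List.sum_cons]
    have hshift : ((List.range t.length).map (fun k =>
          ((a :: b :: t).getD (k + 1 + 1) 0 - (a :: b :: t).getD (k + 1) 0)
            * (2 ^ (c + (k + 1) + 1) - 1) * (2 ^ (t.length + 1 - (k + 1)) - 1))).sum
        = ((List.range t.length).map (fun k =>
          ((b :: t).getD (k + 1) 0 - (b :: t).getD k 0)
            * (2 ^ (c + 1 + k + 1) - 1) * (2 ^ (t.length - k) - 1))).sum := by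
      apply congrArg
      apply List.map_congr_left
      intro k _
      have e1 : c + (k + 1) + 1 = c + 1 + k + 1 := by omega
      have e2 : t.length + 1 - (k + 1) = t.length - k := by omega
      simp only [List.getD_cons_succ, e1, e2]
    simp only [List.map_map]
    have hcomp : ((List.range t.length).map ((fun k =>
          ((a :: b :: t).getD (k + 1) 0 - (a :: b :: t).getD k 0)
            * (2 ^ (c + k + 1) - 1) * (2 ^ (t.length + 1 - k) - 1)) ∘ Nat.succ)).sum
        = ((List.range t.length).map (fun k =>
          ((b :: t).getD (k + 1) 0 - (b :: t).getD k 0)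
            * (2 ^ (c + 1 + k + 1) - 1) * (2 ^ (t.length - k) - 1))).sum := by
      rw [← hshift]
      apply congrArg
      apply List.map_congr_left
      intro k _
      simp only [Function.comp_apply, Nat.succ_eq_add_one]
    rw [hcomp, ih b (c + 1)]
    simp only [List.getD_cons_succ, List.getD_cons_zero, Nat.sub_zero, pvW, pvV, List.length_cons]
    rw [pow_succ 2 c, pow_succ 2 (t.length + 1), pow_succ 2 t.length]
    ring

-- the gap sum equals the exact max-sum minus min-sum
lemma pvGapSum (l : List Int) :
    ((List.range (l.length - 1)).map (fun k =>
        (l.getD (k + 1) 0 - l.getD k 0)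
          * (2 ^ (k + 1) - 1) * (2 ^ (l.length - 1 - k) - 1))).sum
      = pvW l - pvV l := by
  cases l with
  | nil => simp [pvW, pvV]
  | cons a t =>
    have h := pvGapSumAux a t 0
    simp only [pow_zero, one_mul, sub_self, zero_mul, mul_zero, sub_zero, zero_add] at h
    rw [← h]
    apply congrArg
    apply List.map_congr_left
    intro k _
    have e : (a :: t).length - 1 - k = t.length - k := by simp
    simp only [e]

-- ===== VERDICT (by name: the statement is the Claim_ definition above) =====
theorem solve_spec : Claim_equal_solve := by
  intro A _
  show solve A = solve_alt A
  unfold solve solve_alt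
  set s := PySem.List.sorted A id false with hs
  simp only []
  -- ---- A side: split the paired fold, turn both mod-Horner folds into exact values ----
  rw [PySem.List.foldl_prod_mk
        (fun m i => PySem.Int.mod (2 * m + PySem.List.pyGetD s i 0) 1000000007)
        (fun m i => PySem.Int.mod (2 * m + PySem.List.pyGetD s ((s.length : Int) - 1 - i) 0) 1000000007)]
  have hrev : (PySem.List.pyRange 0 (s.length : Int) 1).foldl
      (fun m i => PySem.Int.mod (2 * m + PySem.List.pyGetD s ((s.length : Int) - 1 - i) 0) 1000000007) 0
      = s.reverse.foldl (fun m a => PySem.Int.mod (2 * m + a) 1000000007) 0 := by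
    rw [PySem.List.foldl_congr_mem _ _
        (fun m i => PySem.Int.mod (2 * m + PySem.List.pyGetD s.reverse i 0) 1000000007) _
        (by
          intro acc x hx
          rw [PySem.List.mem_pyRange_one] at hx
          rw [pvGet_rev s x hx.1 hx.2])]
    have := PySem.List.foldl_pyRange_zero_pyGetD' s.reverse (0 : Int)
        (fun m a => PySem.Int.mod (2 * m + a) 1000000007) (0 : Int)
    simpa [List.length_reverse] using this
  have hfwd : (PySem.List.pyRange 0 (s.length : Int) 1).foldl
      (fun m i => PySem.Int.mod (2 * m + PySem.List.pyGetD s i 0) 1000000007) 0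
      = s.foldl (fun m a => PySem.Int.mod (2 * m + a) 1000000007) 0 :=
    PySem.List.foldl_pyRange_zero_pyGetD' s (0 : Int)
      (fun m a => PySem.Int.mod (2 * m + a) 1000000007) (0 : Int)
  rw [hrev, hfwd]
  have hzero : (0 : Int) = PySem.Int.mod 0 1000000007 := rfl
  have hmin : s.foldl (fun m a => PySem.Int.mod (2 * m + a) 1000000007) 0
      = PySem.Int.mod (pvV s) 1000000007 := by
    rw [hzero, pvHmod s 0, pvH_eq_pvV]
  have hmax : s.reverse.foldl (fun m a => PySem.Int.mod (2 * m + a) 1000000007) 0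
      = PySem.Int.mod (pvW s) 1000000007 := by
    rw [hzero, pvHmod s.reverse 0, pvH_reverse_eq_pvW]
  rw [hmin, hmax]
  -- ---- B side: index fold over range(n-1) → Nat-indexed fold, then exact gap sum ----
  rw [PySem.List.pyRange_one, List.foldl_map]
  have hlen : (((s.length : Int)) - 1 - 0).toNat = s.length - 1 := by omega
  rw [hlen]
  simp only [zero_add]
  have hB := pvFoldMod0 (List.range (s.length - 1))
      (fun k => PySem.Int.mod ((PySem.List.pyGetD s ((k : Int) + 1) 0
                  - PySem.List.pyGetD s (k : Int) 0)
                * (PySem.Int.powMod 2 ((k : Int) + 1).toNat 1000000007 - 1)) 1000000007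
              * (PySem.Int.powMod 2 ((s.length : Int) - 1 - (k : Int)).toNat 1000000007 - 1))
      (fun k => (s.getD (k + 1) 0 - s.getD k 0)
                * (2 ^ (k + 1) - 1) * (2 ^ (s.length - 1 - k) - 1))
      (by
        intro k hk
        have hk' : k < s.length - 1 := List.mem_range.mp hk
        beta_reduce
        have e1 : ((k : Int) + 1) = ((k + 1 : ℕ) : Int) := by push_cast; ring
        have e3 : ((k : Int) + 1).toNat = k + 1 := by omega
        have e4 : (((s.length : Int) - 1 - (k : Int))).toNat = s.length - 1 - k := by omega
        rw [e3, e4, e1, PySem.List.pyGetD_natCast, PySem.List.pyGetD_natCast,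
            PySem.Int.powMod_eq_emod 2 (k + 1) (by norm_num),
            PySem.Int.powMod_eq_emod 2 (s.length - 1 - k) (by norm_num)]
        exact pvTermCong (s.getD (k + 1) 0 - s.getD k 0) (2 ^ (k + 1)) (2 ^ (s.length - 1 - k)))
  beta_reduce at hB
  rw [hB, pvGapSum s]
  -- ---- both sides reduced: pure emod arithmetic ----
  rw [PySem.Int.mod_eq_emod_of_pos (a := pvW s) (by norm_num),
      PySem.Int.mod_eq_emod_of_pos (a := pvV s) (by norm_num),
      PySem.Int.mod_eq_emod_of_pos (by norm_num),
      PySem.Int.mod_eq_emod_of_pos (by norm_num)]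
  omega
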